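-- pv_equiv track=rewrite | github.com/stevenshan-dev/puzzle | gerry.py | districtMapping2Answer
-- ===== SOURCE A (Python) =====
-- def getFinalDistrict(district, final, merges):
-- 	if district not in merges:
-- 		return district
-- 	if district in final:
-- 		return final[district]
-- 	temp = getFinalDistrict(merges[district], final, merges)
-- 	final[district] = temp
-- 	return temp
--
-- def districtMapping2Answer(districtMapping, merges = {}):
-- 	finalDistricts = {}
-- 	index = 0
-- 	district2district = {}
-- 	for block in districtMapping:
-- 		district = getFinalDistrict(districtMapping[block], finalDistricts, merges)
--
-- 		if district in district2district:
-- 			district2district[district][1].append(block)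
-- 		else:
-- 			district2district[district] = (index, [block])
-- 			index += 1
--
-- 	answer = [None] * len(district2district)
-- 	for district in district2district:
-- 		index, blocks = district2district[district]
-- 		answer[index] = blocks
--
-- 	return answer
-- ===== SOURCE B (Python) =====
-- def districtMapping2Answer(districtMapping, merges={}):
--     groups = {}
--     for block in districtMapping:
--         district = districtMapping[block]
--         while district in merges:
--             district = merges[district]
--         groups.setdefault(district, []).append(block)
--     return list(groups.values())
-- ===== Notes on version B (the rewrite author's own statement) =====
-- stated objective: simpler
-- what changed: Replaced the memoized recursive chain-follower and the index-counter/placeholder-reconstruction pass with an iterative while-loop walk and a single setdefault grouping that returns the dict's values in insertion order.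
import Mathlib
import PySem

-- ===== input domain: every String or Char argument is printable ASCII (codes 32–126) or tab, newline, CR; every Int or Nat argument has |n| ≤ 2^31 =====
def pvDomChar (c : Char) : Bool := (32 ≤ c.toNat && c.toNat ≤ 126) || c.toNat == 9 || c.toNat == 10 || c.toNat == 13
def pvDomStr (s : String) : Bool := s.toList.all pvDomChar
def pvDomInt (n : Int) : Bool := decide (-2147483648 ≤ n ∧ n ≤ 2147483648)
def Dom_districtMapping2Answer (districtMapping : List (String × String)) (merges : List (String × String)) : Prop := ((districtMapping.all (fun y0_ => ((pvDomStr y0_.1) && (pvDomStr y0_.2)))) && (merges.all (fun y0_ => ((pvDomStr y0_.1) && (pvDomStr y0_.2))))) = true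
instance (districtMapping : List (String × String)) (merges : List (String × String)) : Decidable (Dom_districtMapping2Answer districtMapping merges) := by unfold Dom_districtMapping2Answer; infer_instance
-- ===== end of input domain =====

-- B replaces A's memoized recursion and index-counter/placeholder-reconstruction pass with an
-- iterative chain walk and an insertion-ordered setdefault grouping (objective: simpler).

-- ===== PORT A =====
/-- Port of A's `getFinalDistrict`; `fuel` only makes the Python recursion structural
    (it is never exhausted on inputs satisfying `Pre_`).  The memo dict `final` is
    threaded explicitly (Python mutates it in place). -/
def getFinalDistrict (merges : PySem.Dict String String) :
    Nat → String → PySem.Dict String String → String × PySem.Dict String String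
  | 0, district, final => (district, final)
  | fuel+1, district, final =>
    if merges.contains district = false then (district, final)
    else
      match final.get? district with
      | some v => (v, final)
      | none =>
        let r := getFinalDistrict merges fuel (merges.getD district district) final
        (r.1, r.2.insert district r.1)

def districtMapping2Answer (districtMapping : List (String × String)) (merges : List (String × String)) : List (List String) :=
  let dmD := PySem.Dict.ofList districtMapping
  let msD := PySem.Dict.ofList merges
  -- state = (finalDistricts, index, district2district); `for block in districtMapping`
  let st := dmD.items.foldl (fun st p =>
      let r := getFinalDistrict msD (msD.size + 1) p.2 st.1
      match st.2.2.get? r.1 with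
      | some iv => (r.2, st.2.1, st.2.2.insert r.1 (iv.1, iv.2 ++ [p.1]))
      | none => (r.2, st.2.1 + 1, st.2.2.insert r.1 (st.2.1, [p.1])))
    ((PySem.Dict.empty : PySem.Dict String String), (0 : Nat),
     (PySem.Dict.empty : PySem.Dict String (Nat × List String)))
  -- answer = [None] * len(district2district): ported as `replicate size []` since the
  -- second loop assigns every slot exactly once (the stored indices are 0..size-1)
  st.2.2.items.foldl (fun answer q => answer.set q.2.1 q.2.2)
    (List.replicate st.2.2.size ([] : List String))

-- ===== PORT B =====
/-- Port of B's `while district in merges: district = merges[district]`; `fuel` only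
    bounds the loop to make it structural (sufficient on inputs satisfying `Pre_`). -/
def finalOf (merges : PySem.Dict String String) : Nat → String → String
  | 0, district => district
  | fuel+1, district =>
    match merges.get? district with
    | some nxt => finalOf merges fuel nxt
    | none => district

def districtMapping2Answer_alt (districtMapping : List (String × String)) (merges : List (String × String)) : List (List String) :=
  let msD := PySem.Dict.ofList merges
  ((PySem.Dict.ofList districtMapping).items.foldl
      (fun g p => g.modify (finalOf msD (msD.size + 1) p.2) [] (· ++ [p.1]))
      (PySem.Dict.empty : PySem.Dict String (List String))).values

-- ===== PRECONDITION & SPEC =====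
/-- one step along the merge chain (identity off the keys of `merges`) -/
def pvStep (msD : PySem.Dict String String) (d : String) : String := msD.getD d d

-- Pre_ excludes exactly the inputs on which a merge chain starting from some district
-- used by districtMapping cycles: there Python A raises RecursionError (and B's while
-- loop does not terminate).  A chain is acyclic iff it leaves the keys of merges
-- within `size merges` steps.
def Pre_districtMapping2Answer (districtMapping : List (String × String)) (merges : List (String × String)) : Prop :=
  ∀ v ∈ (PySem.Dict.ofList districtMapping).values,
    (PySem.Dict.ofList merges).contains
      ((pvStep (PySem.Dict.ofList merges))^[(PySem.Dict.ofList merges).size] v) = false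

instance (districtMapping : List (String × String)) (merges : List (String × String)) : Decidable (Pre_districtMapping2Answer districtMapping merges) := by unfold Pre_districtMapping2Answer; infer_instance

def pvWitness_districtMapping2Answer : (List (String × String)) × (List (String × String)) :=
  ([("b1", "d1"), ("b2", "d2"), ("b3", "d1")], [("d1", "d3"), ("d3", "d4")])

def Spec_districtMapping2Answer (districtMapping : List (String × String)) (merges : List (String × String)) (out : List (List String)) : Prop := out = districtMapping2Answer_alt districtMapping merges
instance (districtMapping : List (String × String)) (merges : List (String × String)) (out : List (List String)) : Decidable (Spec_districtMapping2Answer districtMapping merges out) := by unfold Spec_districtMapping2Answer; infer_instance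

-- ===== CLAIM (what is proved, stated in full; the proofs are below) =====
def Claim_equal_districtMapping2Answer : Prop := ∀ (districtMapping : List (String × String)) (merges : List (String × String)), Dom_districtMapping2Answer districtMapping merges → Pre_districtMapping2Answer districtMapping merges → Spec_districtMapping2Answer districtMapping merges (districtMapping2Answer districtMapping merges)

-- ===== LEMMAS AND PROOFS =====

/-- the final (stable) district of the chain starting at `p`'s raw district -/
def keyOf (msD : PySem.Dict String String) (p : String × String) : String :=
  (pvStep msD)^[msD.size] p.2

/-- the blocks of `l` whose chain ends at `c`, in order -/
def grpOf (msD : PySem.Dict String String) (l : List (String × String)) (c : String) : List String :=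
  (l.filter (fun p => keyOf msD p == c)).map (fun p => p.1)

/-- the items of A's `district2district` after processing `l` -/
def canon (msD : PySem.Dict String String) (l : List (String × String)) :
    List (String × Nat × List String) :=
  (PySem.Set.ofList (l.map (keyOf msD))).zipIdx.map (fun q => (q.1, q.2, grpOf msD l q.1))

/-- memo-dict invariant: every cached value is the stable end of its chain -/
def MemoOK (msD fin : PySem.Dict String String) : Prop :=
  ∀ k v, fin.get? k = some v → v = (pvStep msD)^[msD.size] k

theorem pvStep_of_not_contains (msD : PySem.Dict String String) (d : String)
    (h : msD.contains d = false) : pvStep msD d = d :=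
  PySem.Dict.getD_of_not_contains msD d h

theorem iterate_pvStep_fix (msD : PySem.Dict String String) (d : String)
    (h : msD.contains d = false) : ∀ m, (pvStep msD)^[m] d = d := by
  intro m
  induction m with
  | zero => rfl
  | succ m ih => rw [Function.iterate_succ_apply, pvStep_of_not_contains _ _ h, ih]

theorem iterate_pvStep_stable (msD : PySem.Dict String String) (d : String) (f m : Nat)
    (hfm : f ≤ m) (h : msD.contains ((pvStep msD)^[f] d) = false) :
    (pvStep msD)^[m] d = (pvStep msD)^[f] d := by
  obtain ⟨k, rfl⟩ := Nat.exists_eq_add_of_le hfm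
  rw [Nat.add_comm, Function.iterate_add_apply, iterate_pvStep_fix _ _ h]

theorem finalOf_eq (msD : PySem.Dict String String) :
    ∀ (f : Nat) (d : String), msD.contains ((pvStep msD)^[f] d) = false →
      finalOf msD (f + 1) d = (pvStep msD)^[f] d := by
  intro f
  induction f with
  | zero =>
    intro d h
    simp only [Function.iterate_zero_apply] at h ⊢
    rw [finalOf.eq_2, (PySem.Dict.get?_eq_none_iff_contains msD d).2 h]
  | succ f ih =>
    intro d h
    cases hg : msD.get? d with
    | none =>
      have hc : msD.contains d = false := (PySem.Dict.get?_eq_none_iff_contains msD d).1 hg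
      rw [finalOf.eq_2, hg, iterate_pvStep_fix msD d hc]
    | some nxt =>
      have hstep : pvStep msD d = nxt := by
        simp [pvStep, PySem.Dict.getD_eq_get?_getD, hg]
      have h' : msD.contains ((pvStep msD)^[f] nxt) = false := by
        rw [← hstep, ← Function.iterate_succ_apply]; exact h
      rw [finalOf.eq_2, hg]
      show finalOf msD (f + 1) nxt = _
      rw [ih nxt h', ← hstep, ← Function.iterate_succ_apply]

theorem gfd_eq_notin (msD : PySem.Dict String String) (fuel : Nat) (d : String)
    (fin : PySem.Dict String String) (hc : msD.contains d = false) :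
    getFinalDistrict msD (fuel + 1) d fin = (d, fin) := by
  rw [getFinalDistrict.eq_2, hc]; rfl

theorem gfd_eq_memo (msD : PySem.Dict String String) (fuel : Nat) (d v : String)
    (fin : PySem.Dict String String) (hc : msD.contains d = true)
    (hg : fin.get? d = some v) :
    getFinalDistrict msD (fuel + 1) d fin = (v, fin) := by
  rw [getFinalDistrict.eq_2, hc, hg]; rfl

theorem gfd_eq_rec (msD : PySem.Dict String String) (fuel : Nat) (d : String)
    (fin : PySem.Dict String String) (hc : msD.contains d = true)
    (hg : fin.get? d = none) :
    getFinalDistrict msD (fuel + 1) d fin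
      = ((getFinalDistrict msD fuel (msD.getD d d) fin).1,
         (getFinalDistrict msD fuel (msD.getD d d) fin).2.insert d
           (getFinalDistrict msD fuel (msD.getD d d) fin).1) := by
  rw [getFinalDistrict.eq_2, hc, hg]; rfl

theorem getFinalDistrict_spec (msD : PySem.Dict String String) :
    ∀ (f : Nat) (d : String) (fin : PySem.Dict String String), f ≤ msD.size →
      msD.contains ((pvStep msD)^[f] d) = false → MemoOK msD fin →
      (getFinalDistrict msD (f + 1) d fin).1 = (pvStep msD)^[msD.size] d ∧
        MemoOK msD (getFinalDistrict msD (f + 1) d fin).2 := by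
  intro f
  induction f with
  | zero =>
    intro d fin _ h hfin
    simp only [Function.iterate_zero_apply] at h
    rw [gfd_eq_notin msD 0 d fin h]
    exact ⟨(iterate_pvStep_fix msD d h msD.size).symm, hfin⟩
  | succ f ih =>
    intro d fin hle h hfin
    by_cases hc : msD.contains d = false
    · rw [gfd_eq_notin msD (f + 1) d fin hc]
      exact ⟨(iterate_pvStep_fix msD d hc msD.size).symm, hfin⟩
    · rw [Bool.not_eq_false] at hc
      cases hg : fin.get? d with
      | some v =>
        rw [gfd_eq_memo msD (f + 1) d v fin hc hg]
        exact ⟨hfin d v hg, hfin⟩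
      | none =>
        rw [gfd_eq_rec msD (f + 1) d fin hc hg]
        have h' : msD.contains ((pvStep msD)^[f] (pvStep msD d)) = false := by
          rw [← Function.iterate_succ_apply]; exact h
        obtain ⟨ih1, ih2⟩ := ih (pvStep msD d) fin (Nat.le_of_succ_le hle) h' hfin
        have hTT : (pvStep msD)^[msD.size] (pvStep msD d) = (pvStep msD)^[msD.size] d := by
          rw [← Function.iterate_succ_apply,
            iterate_pvStep_stable msD d (f + 1) (msD.size + 1) (by omega) h,
            iterate_pvStep_stable msD d (f + 1) msD.size hle h]
        have hgd : msD.getD d d = pvStep msD d := rfl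
        rw [hgd]
        refine ⟨ih1.trans hTT, ?_⟩
        intro k v hkv
        rw [PySem.Dict.get?_insert] at hkv
        split at hkv
        · next heq =>
            injection hkv with hv
            subst heq
            rw [← hv, ih1, hTT]
        · exact ih2 k v hkv

theorem memoOK_empty (msD : PySem.Dict String String) : MemoOK msD PySem.Dict.empty := by
  intro k v h
  rw [PySem.Dict.get?_empty] at h
  cases h

theorem grpOf_append (msD : PySem.Dict String String) (l : List (String × String))
    (p : String × String) (c : String) :
    grpOf msD (l ++ [p]) c
      = grpOf msD l c ++ (if keyOf msD p == c then [p.1] else []) := by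
  simp only [grpOf, List.filter_append, List.map_append]
  congr 1
  by_cases h : keyOf msD p == c <;> simp [List.filter, h]

theorem canon_map_fst (msD : PySem.Dict String String) (l : List (String × String)) :
    (canon msD l).map Prod.fst = PySem.Set.ofList (l.map (keyOf msD)) := by
  simp only [canon, List.map_map, Function.comp_def]
  exact List.zipIdx_map_fst 0 _

theorem keys_mk_canon (msD : PySem.Dict String String) (l : List (String × String)) :
    (PySem.Dict.mk (canon msD l)).keys = PySem.Set.ofList (l.map (keyOf msD)) := by
  rw [← canon_map_fst]; rfl

theorem nodup_keys_mk_canon (msD : PySem.Dict String String) (l : List (String × String)) :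
    (PySem.Dict.mk (canon msD l)).keys.Nodup := by
  rw [keys_mk_canon]; exact PySem.Set.nodup_ofList _

theorem ofList_append_singleton {α : Type} [BEq α] (xs : List α) (x : α) :
    PySem.Set.ofList (xs ++ [x]) = PySem.Set.add (PySem.Set.ofList xs) x := by
  simp [PySem.Set.ofList]

theorem get?_mk_canon_of_mem (msD : PySem.Dict String String) (l : List (String × String))
    (q : String × Nat) (hq : q ∈ (PySem.Set.ofList (l.map (keyOf msD))).zipIdx) :
    (PySem.Dict.mk (canon msD l)).get? q.1 = some (q.2, grpOf msD l q.1) := by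
  exact PySem.Dict.get?_of_mem_items _
    (show (q.1, q.2, grpOf msD l q.1) ∈ (PySem.Dict.mk (canon msD l)).items from
      List.mem_map_of_mem hq)
    (nodup_keys_mk_canon msD l)

theorem mem_of_get?_mk_canon (msD : PySem.Dict String String) (l : List (String × String))
    (c : String) (iv : Nat × List String)
    (hget : (PySem.Dict.mk (canon msD l)).get? c = some iv) :
    c ∈ PySem.Set.ofList (l.map (keyOf msD)) := by
  by_contra hn
  rw [(PySem.Dict.get?_eq_none_iff_contains _ _).2 ?_] at hget
  · cases hget
  · rw [PySem.Dict.contains_eq_decide_mem_keys, keys_mk_canon]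
    simpa using hn

theorem ofList_append_of_mem (msD : PySem.Dict String String) (pref : List (String × String))
    (p : String × String) (hmem : keyOf msD p ∈ PySem.Set.ofList (pref.map (keyOf msD))) :
    PySem.Set.ofList ((pref ++ [p]).map (keyOf msD))
      = PySem.Set.ofList (pref.map (keyOf msD)) := by
  rw [List.map_append, List.map_cons, List.map_nil, ofList_append_singleton, PySem.Set.add,
    if_pos (show (PySem.Set.ofList (pref.map (keyOf msD))).contains (keyOf msD p) = true from
      List.elem_eq_true_of_mem hmem)]

theorem canon_insert_of_mem (msD : PySem.Dict String String) (pref : List (String × String))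
    (p : String × String) (i : Nat) (blocks : List String)
    (hget : (PySem.Dict.mk (canon msD pref)).get? (keyOf msD p) = some (i, blocks)) :
    (PySem.Dict.mk (canon msD pref)).insert (keyOf msD p) (i, blocks ++ [p.1])
      = PySem.Dict.mk (canon msD (pref ++ [p])) := by
  have hmem : keyOf msD p ∈ PySem.Set.ofList (pref.map (keyOf msD)) :=
    mem_of_get?_mk_canon msD pref _ _ hget
  have hcontains : (PySem.Dict.mk (canon msD pref)).contains (keyOf msD p) = true := by
    rw [PySem.Dict.contains_eq_decide_mem_keys, keys_mk_canon]
    simpa using hmem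
  apply PySem.Dict.ext
  rw [PySem.Dict.items_insert_of_contains _ _ hcontains]
  show List.map _ (canon msD pref) = canon msD (pref ++ [p])
  rw [canon, canon, ofList_append_of_mem msD pref p hmem, List.map_map]
  apply List.map_congr_left
  intro q hq
  by_cases hqk : (q.1 == keyOf msD p) = true
  · have hq1 : q.1 = keyOf msD p := eq_of_beq hqk
    have hgetq := get?_mk_canon_of_mem msD pref q hq
    rw [hq1, hget] at hgetq
    have h1 : i = q.2 := by cases hgetq; rfl
    have h2 : blocks = grpOf msD pref (keyOf msD p) := by cases hgetq; rfl
    simp [hq1, h1, h2, grpOf_append]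
  · have hqk' : (q.1 == keyOf msD p) = false := by simpa using hqk
    have hkq : (keyOf msD p == q.1) = false := BEq.symm_false hqk'
    simp [hkq, grpOf_append]
    exact fun h => absurd h (beq_eq_false_iff_ne.1 hqk')

theorem canon_insert_of_not_mem (msD : PySem.Dict String String)
    (pref : List (String × String)) (p : String × String)
    (hn : ¬ keyOf msD p ∈ PySem.Set.ofList (pref.map (keyOf msD))) :
    (PySem.Dict.mk (canon msD pref)).insert (keyOf msD p)
        ((PySem.Set.ofList (pref.map (keyOf msD))).length, [p.1])
      = PySem.Dict.mk (canon msD (pref ++ [p])) := by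
  have hcontains : (PySem.Dict.mk (canon msD pref)).contains (keyOf msD p) = false := by
    rw [PySem.Dict.contains_eq_decide_mem_keys, keys_mk_canon]
    simpa using hn
  have hnl : ¬ keyOf msD p ∈ pref.map (keyOf msD) := fun h =>
    hn ((PySem.Set.mem_ofList _ _).2 h)
  have hbase : PySem.Set.ofList ((pref ++ [p]).map (keyOf msD))
      = PySem.Set.ofList (pref.map (keyOf msD)) ++ [keyOf msD p] := by
    rw [List.map_append, List.map_cons, List.map_nil, ofList_append_singleton, PySem.Set.add,
      if_neg (show ¬ (PySem.Set.ofList (pref.map (keyOf msD))).contains (keyOf msD p) = true from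
        fun hct => hn (List.mem_of_elem_eq_true hct))]
  apply PySem.Dict.ext
  rw [PySem.Dict.items_insert_of_not_contains _ _ hcontains]
  show canon msD pref ++ _ = canon msD (pref ++ [p])
  rw [canon, canon, hbase, List.zipIdx_append, List.map_append]
  congr 1
  · apply List.map_congr_left
    intro q hq
    have hq1 : q.1 ∈ pref.map (keyOf msD) := by
      have hmem : q.1 ∈ PySem.Set.ofList (pref.map (keyOf msD)) := by
        rw [← List.zipIdx_map_fst 0 (PySem.Set.ofList (pref.map (keyOf msD)))]
        exact List.mem_map_of_mem hq
      exact (PySem.Set.mem_ofList _ _).1 hmem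
    have hkq : (keyOf msD p == q.1) = false := by
      rw [beq_eq_false_iff_ne]
      intro h; rw [h] at hnl; exact hnl hq1
    rw [grpOf_append]
    simp [hkq]
  · have hgrp : grpOf msD pref (keyOf msD p) = [] := by
      rw [grpOf, List.filter_eq_nil_iff.2, List.map_nil]
      intro x hx
      simp only [beq_iff_eq]
      intro h; rw [← h] at hnl; exact hnl (List.mem_map_of_mem hx)
    simp [grpOf_append, hgrp]

/-- the loop body of A's first `for` loop, as written in `districtMapping2Answer` -/
def AStep (msD : PySem.Dict String String)
    (st : PySem.Dict String String × Nat × PySem.Dict String (Nat × List String))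
    (p : String × String) :
    PySem.Dict String String × Nat × PySem.Dict String (Nat × List String) :=
  let r := getFinalDistrict msD (msD.size + 1) p.2 st.1
  match st.2.2.get? r.1 with
  | some iv => (r.2, st.2.1, st.2.2.insert r.1 (iv.1, iv.2 ++ [p.1]))
  | none => (r.2, st.2.1 + 1, st.2.2.insert r.1 (st.2.1, [p.1]))

theorem foldA (msD : PySem.Dict String String) :
    ∀ (l pref : List (String × String)) (fin : PySem.Dict String String),
      MemoOK msD fin → (∀ p ∈ l, msD.contains (keyOf msD p) = false) →
      ∃ fin', MemoOK msD fin' ∧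
        List.foldl (AStep msD)
          (fin, (PySem.Set.ofList (pref.map (keyOf msD))).length,
            PySem.Dict.mk (canon msD pref)) l
        = (fin', (PySem.Set.ofList ((pref ++ l).map (keyOf msD))).length,
            PySem.Dict.mk (canon msD (pref ++ l))) := by
  intro l
  induction l with
  | nil =>
    intro pref fin hfin _
    exact ⟨fin, hfin, by simp⟩
  | cons p l ih =>
    intro pref fin hfin hl
    have hp : msD.contains (keyOf msD p) = false := hl p (List.mem_cons_self ..)
    obtain ⟨hr1, hr2⟩ := getFinalDistrict_spec msD msD.size p.2 fin le_rfl hp hfin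
    have hr1' : (getFinalDistrict msD (msD.size + 1) p.2 fin).1 = keyOf msD p := hr1
    rw [List.foldl_cons]
    have hstep : AStep msD
        (fin, (PySem.Set.ofList (pref.map (keyOf msD))).length, PySem.Dict.mk (canon msD pref)) p
        = ((getFinalDistrict msD (msD.size + 1) p.2 fin).2,
           (PySem.Set.ofList ((pref ++ [p]).map (keyOf msD))).length,
           PySem.Dict.mk (canon msD (pref ++ [p]))) := by
      simp only [AStep]
      rw [hr1']
      cases hget : (PySem.Dict.mk (canon msD pref)).get? (keyOf msD p) with
      | some iv =>
        have hmem := mem_of_get?_mk_canon msD pref _ _ hget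
        show ((getFinalDistrict msD (msD.size + 1) p.2 fin).2, _, _) = _
        rw [canon_insert_of_mem msD pref p iv.1 iv.2 hget,
          ofList_append_of_mem msD pref p hmem]
      | none =>
        have hn : ¬ keyOf msD p ∈ PySem.Set.ofList (pref.map (keyOf msD)) := by
          intro hmem
          have hcontains : (PySem.Dict.mk (canon msD pref)).contains (keyOf msD p) = true := by
            rw [PySem.Dict.contains_eq_decide_mem_keys, keys_mk_canon]
            simpa using hmem
          rw [(PySem.Dict.get?_eq_none_iff_contains _ _).1 hget] at hcontains
          cases hcontains
        have hlen : (PySem.Set.ofList ((pref ++ [p]).map (keyOf msD))).length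
            = (PySem.Set.ofList (pref.map (keyOf msD))).length + 1 := by
          rw [List.map_append, List.map_cons, List.map_nil, ofList_append_singleton,
            PySem.Set.add,
            if_neg (show ¬ (PySem.Set.ofList (pref.map (keyOf msD))).contains (keyOf msD p) = true from
              fun hct => hn (List.mem_of_elem_eq_true hct))]
          simp
        show ((getFinalDistrict msD (msD.size + 1) p.2 fin).2, _, _) = _
        rw [canon_insert_of_not_mem msD pref p hn, hlen]
    rw [hstep]
    obtain ⟨fin', h1, h2⟩ := ih (pref ++ [p]) _ hr2 (fun q hq => hl q (List.mem_cons_of_mem _ hq))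
    refine ⟨fin', h1, ?_⟩
    rw [h2, List.append_assoc]
    rfl

theorem recon (g : String → List String) :
    ∀ (D : List String) (j : Nat) (acc : List (List String)), acc.length = j + D.length →
      List.foldl (fun answer q => answer.set q.2.1 q.2.2) acc
        ((D.zipIdx j).map (fun q => (q.1, q.2, g q.1)))
      = acc.take j ++ D.map g := by
  intro D
  induction D with
  | nil =>
    intro j acc h
    simp only [List.zipIdx_nil, List.map_nil, List.foldl_nil, List.map_nil, List.append_nil]
    have hj : acc.length ≤ j := by simp at h; omega
    exact (List.take_of_length_le hj).symm
  | cons a D ih =>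
    intro j acc h
    rw [List.zipIdx_cons, List.map_cons, List.foldl_cons]
    have hlt : j < acc.length := by simp at h; omega
    rw [ih (j + 1) (acc.set j (g a)) (by rw [List.length_set]; simp at h; omega)]
    rw [List.set_eq_take_cons_drop (g a) hlt]
    rw [show j + 1 = (acc.take j).length + 1 by rw [List.length_take]; omega,
      List.take_length_add_append]
    simp

theorem alt_characterization (districtMapping merges : List (String × String))
    (hpre : Pre_districtMapping2Answer districtMapping merges) :
    districtMapping2Answer_alt districtMapping merges
      = (PySem.Set.ofList ((PySem.Dict.ofList districtMapping).items.map
            (keyOf (PySem.Dict.ofList merges)))).map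
          (grpOf (PySem.Dict.ofList merges) (PySem.Dict.ofList districtMapping).items) := by
  show ((PySem.Dict.ofList districtMapping).items.foldl
      (fun g p => g.modify (finalOf (PySem.Dict.ofList merges)
        ((PySem.Dict.ofList merges).size + 1) p.2) [] (· ++ [p.1]))
      PySem.Dict.empty).values = _
  rw [PySem.List.foldl_congr_mem _ _
    (fun g p => g.modify (keyOf (PySem.Dict.ofList merges) p) [] (· ++ [p.1])) _
    (fun acc p hp => by
      have hf := finalOf_eq (PySem.Dict.ofList merges) (PySem.Dict.ofList merges).size p.2
        (hpre p.2 (List.mem_map_of_mem hp))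
      simp only [hf]
      rfl)]
  have hnd : ((PySem.Dict.ofList districtMapping).items.foldl
      (fun g p => g.modify (keyOf (PySem.Dict.ofList merges) p) [] (· ++ [p.1]))
      PySem.Dict.empty).keys.Nodup := by
    apply PySem.Dict.nodup_keys_foldl_modify_key _ _ _ _ _
    rw [PySem.Dict.keys_empty]
    exact List.nodup_nil
  rw [PySem.Dict.values_eq_map_keys _ hnd []]
  rw [PySem.Dict.keys_foldl_modify_key _ (fun p => keyOf (PySem.Dict.ofList merges) p) []
    (fun _ p => (· ++ [p.1])) PySem.Dict.empty]
  rw [PySem.Dict.keys_empty, PySem.Set.update_nil_left]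
  apply List.map_congr_left
  intro c hc
  rw [show ((PySem.Dict.ofList districtMapping).items.foldl
      (fun g p => g.modify (keyOf (PySem.Dict.ofList merges) p) [] (· ++ [p.1]))
      PySem.Dict.empty)
    = (((PySem.Dict.ofList districtMapping).items.map
        (fun p => (keyOf (PySem.Dict.ofList merges) p, p.1))).foldl
        (fun g t => g.modify t.1 [] (· ++ [t.2])) PySem.Dict.empty) from
    Eq.symm (List.foldl_map
      (f := fun p => (keyOf (PySem.Dict.ofList merges) p, p.1))
      (g := fun g t => g.modify t.1 [] (· ++ [t.2]))
      (l := (PySem.Dict.ofList districtMapping).items)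
      (init := PySem.Dict.empty))]
  rw [PySem.Dict.getD_foldl_modify_append, PySem.Dict.getD_empty]
  rw [grpOf, List.filter_map]
  simp [Function.comp_def, List.map_map]

-- ===== VERDICT (by name: the statement is the Claim_ definition above) =====
theorem districtMapping2Answer_spec : Claim_equal_districtMapping2Answer := by
  intro districtMapping merges _ hpre
  unfold Spec_districtMapping2Answer
  have hA : districtMapping2Answer districtMapping merges
      = (List.foldl (AStep (PySem.Dict.ofList merges))
          (PySem.Dict.empty, 0, PySem.Dict.empty)
          (PySem.Dict.ofList districtMapping).items).2.2.items.foldl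
          (fun answer q => answer.set q.2.1 q.2.2)
          (List.replicate (List.foldl (AStep (PySem.Dict.ofList merges))
            (PySem.Dict.empty, 0, PySem.Dict.empty)
            (PySem.Dict.ofList districtMapping).items).2.2.size []) := rfl
  obtain ⟨fin', hfin', hfold⟩ := foldA (PySem.Dict.ofList merges)
    (PySem.Dict.ofList districtMapping).items [] PySem.Dict.empty
    (memoOK_empty _) (fun p hp => hpre p.2 (List.mem_map_of_mem hp))
  rw [hA,
    show ((PySem.Dict.empty : PySem.Dict String String), (0 : Nat),
        (PySem.Dict.empty : PySem.Dict String (Nat × List String)))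
      = (PySem.Dict.empty,
          (PySem.Set.ofList (([] : List (String × String)).map
            (keyOf (PySem.Dict.ofList merges)))).length,
          PySem.Dict.mk (canon (PySem.Dict.ofList merges) [])) from rfl,
    hfold]
  rw [alt_characterization districtMapping merges hpre]
  show (canon (PySem.Dict.ofList merges) ([] ++ (PySem.Dict.ofList districtMapping).items)).foldl
      _ (List.replicate (canon (PySem.Dict.ofList merges)
        ([] ++ (PySem.Dict.ofList districtMapping).items)).length _) = _
  rw [List.nil_append, canon]
  rw [recon (grpOf (PySem.Dict.ofList merges) (PySem.Dict.ofList districtMapping).items) _ 0 _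
    (by simp)]
  simp
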